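-- pv_equiv track=rewrite | github.com/arthur-batel/liriscat | experiments/scripts/make_table.py | best_indices
-- ===== SOURCE A (Python) =====
-- def best_indices(values, objective):
--     valid = [(i, v) for i, v in enumerate(values) if v is not None]
--     if not valid: return set()
--     if objective == "min":
--         bestv = min(v for _, v in valid)
--     else:
--         bestv = max(v for _, v in valid)
--     return {i for i, v in valid if v == bestv}
-- ===== SOURCE B (Python) =====
-- def best_indices(values, objective):
--     better = (lambda a, b: a < b) if objective == "min" else (lambda a, b: a > b)
--     best = None
--     res = []
--     for i, v in enumerate(values):
--         if v is None:
--             continue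
--         if best is None or better(v, best):
--             best = v
--             res = [i]
--         elif v == best:
--             res.append(i)
--     return set(res)
-- ===== Notes on version B (the rewrite author's own statement) =====
-- stated objective: alternative
-- what changed: replaces the three-pass shape (build valid pairs, min/max over them, filter again) by a single stateful pass over enumerate(values) that keeps the current best value and the list of indices achieving it
import Mathlib
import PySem

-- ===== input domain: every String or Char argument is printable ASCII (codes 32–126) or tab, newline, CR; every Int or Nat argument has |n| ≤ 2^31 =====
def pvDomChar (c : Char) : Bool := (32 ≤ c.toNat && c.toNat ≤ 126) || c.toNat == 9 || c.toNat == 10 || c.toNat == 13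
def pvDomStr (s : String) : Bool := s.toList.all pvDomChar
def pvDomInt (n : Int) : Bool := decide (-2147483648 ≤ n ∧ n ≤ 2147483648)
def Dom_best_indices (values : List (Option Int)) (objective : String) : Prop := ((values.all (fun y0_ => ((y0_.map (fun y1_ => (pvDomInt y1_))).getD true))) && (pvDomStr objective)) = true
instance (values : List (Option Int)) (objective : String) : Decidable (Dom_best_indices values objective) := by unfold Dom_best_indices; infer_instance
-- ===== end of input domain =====

-- B replaces A's three-pass shape (collect valid pairs, min/max, filter) by one stateful pass
-- keeping the running best value and the indices achieving it (objective: alternative).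

-- ===== PORT A =====
def best_indices (values : List (Option Int)) (objective : String) : List Int :=
  let valid : List (Int × Int) :=
    (PySem.List.enumerate values 0).filterMap (fun p => p.2.map (fun v => (p.1, v)))
  if valid = [] then PySem.Set.empty else
  let bestOpt : Option Int :=
    if objective == "min" then PySem.List.min? (valid.map Prod.snd) (fun y => y)
    else PySem.List.max? (valid.map Prod.snd) (fun y => y)
  match bestOpt with
  | none => []   -- unreachable: valid ≠ []
  | some bestv => PySem.Set.ofList ((valid.filter (fun p => p.2 == bestv)).map Prod.fst)

-- ===== PORT B =====
def biBetter (objective : String) : Int → Int → Bool :=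
  if objective == "min" then fun a b => decide (a < b) else fun a b => decide (a > b)

def biGo (better : Int → Int → Bool) : List (Option Int) → Int → Option Int → List Int → List Int
  | [], _, _, res => res
  | none :: rest, i, best, res => biGo better rest (i + 1) best res
  | some v :: rest, i, none, _ => biGo better rest (i + 1) (some v) [i]
  | some v :: rest, i, some b, res =>
      if better v b then biGo better rest (i + 1) (some v) [i]
      else if v == b then biGo better rest (i + 1) (some b) (res ++ [i])
      else biGo better rest (i + 1) (some b) res

def best_indices_alt (values : List (Option Int)) (objective : String) : List Int :=
  PySem.Set.ofList (biGo (biBetter objective) values 0 none [])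

-- ===== PRECONDITION & SPEC =====
def Spec_best_indices (values : List (Option Int)) (objective : String) (out : List Int) : Prop := out = best_indices_alt values objective
instance (values : List (Option Int)) (objective : String) (out : List Int) : Decidable (Spec_best_indices values objective out) := by unfold Spec_best_indices; infer_instance

-- ===== CLAIM (what is proved, stated in full; the proofs are below) =====
def Claim_equal_best_indices : Prop := ∀ (values : List (Option Int)) (objective : String), Dom_best_indices values objective → Spec_best_indices values objective (best_indices values objective)

-- ===== LEMMAS AND PROOFS =====

/-- The valid (index, value) pairs, structurally. -/
def validPairs : List (Option Int) → Int → List (Int × Int)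
  | [], _ => []
  | none :: rest, n => validPairs rest (n + 1)
  | some v :: rest, n => (n, v) :: validPairs rest (n + 1)

/-- Running extremum under a strict "better" relation (keeps the first extremal value). -/
def fbest (better : Int → Int → Bool) (b : Int) (l : List Int) : Int :=
  l.foldl (fun acc v => if better v acc then v else acc) b

def achieve (pairs : List (Int × Int)) (b : Int) : List Int :=
  (pairs.filter (fun p => p.2 == b)).map Prod.fst

/-- B's loop, restricted to the valid pairs. -/
def goP (better : Int → Int → Bool) : List (Int × Int) → Option Int → List Int → List Int
  | [], _, res => res
  | (i, v) :: rest, none, _ => goP better rest (some v) [i]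
  | (i, v) :: rest, some b, res =>
      if better v b then goP better rest (some v) [i]
      else if v == b then goP better rest (some b) (res ++ [i])
      else goP better rest (some b) res

theorem validPairs_eq (vs : List (Option Int)) (n : Int) :
    (PySem.List.enumerate vs n).filterMap (fun p => p.2.map (fun v => (p.1, v))) = validPairs vs n := by
  induction vs generalizing n with
  | nil => simp [validPairs, PySem.List.enumerate_nil]
  | cons x rest ih =>
    cases x <;> simp [PySem.List.enumerate_cons, validPairs, List.filterMap_cons, ih]

theorem biGo_eq_goP (better : Int → Int → Bool) (vs : List (Option Int)) (n : Int)
    (st : Option Int) (res : List Int) :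
    biGo better vs n st res = goP better (validPairs vs n) st res := by
  induction vs generalizing n st res with
  | nil => simp [biGo, validPairs, goP]
  | cons x rest ih =>
    cases x with
    | none => simp [biGo, validPairs, ih]
    | some v =>
      cases st with
      | none => simp [biGo, validPairs, goP, ih]
      | some b =>
        simp only [biGo, validPairs, goP]
        split_ifs <;> apply ih

theorem fbest_cases (better : Int → Int → Bool)
    (htr : ∀ a b c : Int, better a b = true → better b c = true → better a c = true)
    (l : List Int) (b : Int) :
    fbest better b l = b ∨ better (fbest better b l) b = true := by
  induction l generalizing b with
  | nil => exact Or.inl rfl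
  | cons v t ih =>
    simp only [fbest, List.foldl_cons] at *
    cases hb : better v b with
    | true =>
      simp only [hb, if_true]
      rcases ih v with h2 | h2
      · rw [h2]; exact Or.inr hb
      · exact Or.inr (htr _ _ _ h2 hb)
    | false =>
      simp only [hb, Bool.false_eq_true, if_false]
      exact ih b

theorem goP_some (better : Int → Int → Bool)
    (hirr : ∀ a : Int, better a a = false)
    (htr : ∀ a b c : Int, better a b = true → better b c = true → better a c = true)
    (hcon : ∀ a b : Int, a ≠ b → better a b = false → better b a = true)
    (pairs : List (Int × Int)) (b : Int) (res : List Int) :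
    goP better pairs (some b) res =
      (if fbest better b (pairs.map Prod.snd) = b then res else []) ++
        achieve pairs (fbest better b (pairs.map Prod.snd)) := by
  induction pairs generalizing b res with
  | nil => simp [goP, fbest, achieve]
  | cons p rest ih =>
    obtain ⟨i, v⟩ := p
    simp only [goP, List.map_cons, fbest, List.foldl_cons]
    rcases Bool.eq_false_or_eq_true (better v b) with hb | hb
    · -- strictly better: reset
      have hvb : v ≠ b := by
        intro he; subst he; rw [hirr] at hb; exact absurd hb (by simp)
      simp only [hb, if_true]
      rw [ih v [i]]
      have hf := fbest_cases better htr (rest.map Prod.snd) v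
      have hFb : better (fbest better v (rest.map Prod.snd)) b = true := by
        rcases hf with h | h
        · rw [h]; exact hb
        · exact htr _ _ _ h hb
      have hfb : fbest better v (rest.map Prod.snd) ≠ b := by
        intro he; rw [he, hirr] at hFb; exact absurd hFb (by simp)
      simp only [fbest] at hfb hf ⊢
      rw [if_neg hfb]
      simp only [achieve, List.filter_cons, beq_iff_eq]
      by_cases hv : v = (rest.map Prod.snd).foldl (fun acc v => if better v acc then v else acc) v
      · simp only [← hv, decide_true, if_pos, if_true, List.map_cons, List.nil_append]
        simp [achieve, ← hv]
      · rcases hf with h | h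
        · exact absurd h.symm hv
        · simp [hv, achieve]
          exact fun he => hv he.symm
    · -- not strictly better
      simp only [hb, Bool.false_eq_true, if_false]
      by_cases heq : v = b
      · subst heq
        simp only [beq_self_eq_true, if_true, ite_self]
        rw [ih v (res ++ [i])]
        simp only [achieve, List.filter_cons, beq_iff_eq]
        by_cases hfv : fbest better v (rest.map Prod.snd) = v
        · simp only [fbest] at hfv ⊢
          simp [hfv, achieve, List.append_assoc]
        · have hvf : ¬ v = fbest better v (rest.map Prod.snd) := fun h => hfv h.symm
          simp only [fbest] at hfv hvf ⊢
          simp [hfv, hvf, achieve]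
      · have hbv : better b v = true := hcon v b heq hb
        have hne : (v == b) = false := by simp [heq]
        simp only [hne, Bool.false_eq_true, if_false, ite_self]
        rw [ih b res]
        have hf := fbest_cases better htr (rest.map Prod.snd) b
        have hvne : ¬ v = fbest better b (rest.map Prod.snd) := by
          intro he
          rcases hf with h | h
          · rw [h] at he; exact heq he
          · rw [← he] at h; rw [h] at hb; exact absurd hb (by simp)
        simp only [fbest] at hvne ⊢
        simp [hvne, achieve]
theorem goP_none (better : Int → Int → Bool)
    (hirr : ∀ a : Int, better a a = false)
    (htr : ∀ a b c : Int, better a b = true → better b c = true → better a c = true)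
    (hcon : ∀ a b : Int, a ≠ b → better a b = false → better b a = true)
    (pairs : List (Int × Int)) :
    goP better pairs none [] =
      (match pairs with
       | [] => []
       | (_, v) :: rest =>
          achieve pairs (fbest better v (rest.map Prod.snd))) := by
  cases pairs with
  | nil => simp [goP]
  | cons p rest =>
    obtain ⟨i, v⟩ := p
    simp only [goP]
    rw [goP_some better hirr htr hcon rest v [i]]
    have hf := fbest_cases better htr (rest.map Prod.snd) v
    simp only [achieve, List.filter_cons, beq_iff_eq]
    by_cases hfv : fbest better v (rest.map Prod.snd) = v
    · simp only [fbest] at hfv ⊢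
      simp [hfv, achieve]
    · have hvf : ¬ v = fbest better v (rest.map Prod.snd) := fun h => hfv h.symm
      simp only [fbest] at hfv hvf ⊢
      simp [hfv, hvf, achieve]

theorem foldl_min_eq (l : List Int) (b : Int) :
    l.foldl min b = fbest (fun a c => decide (a < c)) b l := by
  induction l generalizing b with
  | nil => rfl
  | cons v t ih =>
    simp only [List.foldl_cons, fbest] at *
    rw [ih]
    congr 1
    simp only [min_def, decide_eq_true_eq]
    split_ifs <;> omega

theorem foldl_max_eq (l : List Int) (b : Int) :
    l.foldl max b = fbest (fun a c => decide (a > c)) b l := by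
  induction l generalizing b with
  | nil => rfl
  | cons v t ih =>
    simp only [List.foldl_cons, fbest] at *
    rw [ih]
    congr 1
    simp only [max_def, decide_eq_true_eq, gt_iff_lt]
    split_ifs <;> omega

theorem lt_irr : ∀ a : Int, (decide (a < a)) = false := by intro a; simp
theorem lt_tr : ∀ a b c : Int, (decide (a < b)) = true → (decide (b < c)) = true → (decide (a < c)) = true := by
  intro a b c h1 h2; simp at *; omega
theorem lt_con : ∀ a b : Int, a ≠ b → (decide (a < b)) = false → (decide (b < a)) = true := by
  intro a b h1 h2; simp at *; omega
theorem gt_irr : ∀ a : Int, (decide (a > a)) = false := by intro a; simp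
theorem gt_tr : ∀ a b c : Int, (decide (a > b)) = true → (decide (b > c)) = true → (decide (a > c)) = true := by
  intro a b c h1 h2; simp at *; omega
theorem gt_con : ∀ a b : Int, a ≠ b → (decide (a > b)) = false → (decide (b > a)) = true := by
  intro a b h1 h2; simp at *; omega

-- ===== VERDICT (by name: the statement is the Claim_ definition above) =====
theorem best_indices_spec : Claim_equal_best_indices := by
  intro values objective _
  unfold Spec_best_indices best_indices best_indices_alt biBetter
  rw [biGo_eq_goP, validPairs_eq]
  by_cases hmin : objective == "min"
  · simp only [hmin, if_true]
    rw [goP_none _ lt_irr lt_tr lt_con]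
    cases h : validPairs values 0 with
    | nil => simp [h, PySem.Set.empty]
    | cons p rest =>
      obtain ⟨i, v⟩ := p
      have hne : validPairs values 0 ≠ [] := by simp [h]
      simp only [h, if_neg hne, List.map_cons, PySem.List.min?_id_cons]
      rw [foldl_min_eq]
      rfl
  · simp only [hmin, Bool.false_eq_true, if_false]
    rw [goP_none _ gt_irr gt_tr gt_con]
    cases h : validPairs values 0 with
    | nil => simp [h, PySem.Set.empty]
    | cons p rest =>
      obtain ⟨i, v⟩ := p
      have hne : validPairs values 0 ≠ [] := by simp [h]
      simp only [h, if_neg hne, List.map_cons, PySem.List.max?_id_cons]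
      rw [foldl_max_eq]
      rfl
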